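-- pv_equiv track=rewrite | github.com/Nainish07/Nainish_P452 | Assignment_2/Assignmet2_lib.py | Transpose_sq
-- ===== SOURCE A (Python) =====
-- def Transpose_sq(z):
--     x = []
--     for i in range(0,len(z)):
--         y = []
--         for j in range(0,len(z)):
--             y.append(z[j][i])
--         x.append(y)
--     return x
-- ===== SOURCE B (Python) =====
-- def Transpose_sq(z):
--     n = len(z)
--     its = [iter(row) for row in z]
--     out = []
--     for _ in range(n):
--         out.append([next(it) for it in its])
--     return out
-- ===== Notes on version B (the rewrite author's own statement) =====
-- stated objective: alternative
-- what changed: Replaces A's double-index gather (out[i][j] = z[j][i]) by a streaming consumption: one iterator per input row, and each of the n output rows is formed by drawing the next element from every row iterator, so no index arithmetic occurs at all.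
import Mathlib
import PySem

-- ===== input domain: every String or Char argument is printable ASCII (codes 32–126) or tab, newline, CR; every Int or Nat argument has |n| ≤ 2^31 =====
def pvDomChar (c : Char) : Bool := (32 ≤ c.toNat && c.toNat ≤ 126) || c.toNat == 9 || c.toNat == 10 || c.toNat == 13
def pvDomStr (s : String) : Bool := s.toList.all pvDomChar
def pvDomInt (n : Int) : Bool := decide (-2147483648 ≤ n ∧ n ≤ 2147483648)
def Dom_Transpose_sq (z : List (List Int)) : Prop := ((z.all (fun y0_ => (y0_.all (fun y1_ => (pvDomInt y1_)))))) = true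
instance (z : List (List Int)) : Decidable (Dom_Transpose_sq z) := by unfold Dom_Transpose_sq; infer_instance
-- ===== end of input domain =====

-- B replaces A's double-index gather by a streaming consumption: one iterator per input row,
-- each output row drawn as the next element of every row iterator (objective: alternative).

-- ===== PORT A =====
def Transpose_sq (z : List (List Int)) : List (List Int) :=
  (PySem.List.pyRange 0 z.length 1).foldl (fun x i =>
    x ++ [(PySem.List.pyRange 0 z.length 1).foldl (fun y j =>
      y ++ [PySem.List.pyGetD (PySem.List.pyGetD z j []) i 0]) []]) []

-- ===== PORT B =====
-- Python iterators are ported by hand (PySem has no iterator primitive): an iterator over a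
-- list is its remaining suffix; next(it) takes the head and advances to the tail. This is
-- exact wherever next succeeds, i.e. on every input admitted by Pre_ (rows of length ≥ n);
-- where Python's next would raise (outside Pre_) the port uses the default 0.
def pvDraw : Nat → List (List Int) → List (List Int)
  | 0, _ => []
  | k + 1, its => its.map (fun it => it.headD 0) :: pvDraw k (its.map List.tail)

def Transpose_sq_alt (z : List (List Int)) : List (List Int) :=
  pvDraw z.length z

-- ===== PRECONDITION & SPEC =====
-- Pre_ excludes exactly the ragged inputs (some row shorter than len(z)) on which the Python A
-- raises IndexError (and B's next raises).
def Pre_Transpose_sq (z : List (List Int)) : Prop := ∀ r ∈ z, z.length ≤ r.length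
instance (z : List (List Int)) : Decidable (Pre_Transpose_sq z) := by unfold Pre_Transpose_sq; infer_instance
def pvWitness_Transpose_sq : List (List Int) := [[1, 2], [3, 4]]
def Spec_Transpose_sq (z : List (List Int)) (out : List (List Int)) : Prop := out = Transpose_sq_alt z
instance (z : List (List Int)) (out : List (List Int)) : Decidable (Spec_Transpose_sq z out) := by unfold Spec_Transpose_sq; infer_instance

-- ===== CLAIM (what is proved, stated in full; the proofs are below) =====
def Claim_equal_Transpose_sq : Prop := ∀ (z : List (List Int)), Dom_Transpose_sq z → Pre_Transpose_sq z → Spec_Transpose_sq z (Transpose_sq z)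

-- ===== LEMMAS AND PROOFS =====

-- the common closed form both ports are reduced to
def pvT (z : List (List Int)) : List (List Int) :=
  (List.range z.length).map (fun (i : Nat) => z.map (fun r => PySem.List.pyGetD r (i : Int) 0))

lemma portA_eq (z : List (List Int)) : Transpose_sq z = pvT z := by
  unfold Transpose_sq pvT
  rw [PySem.List.foldl_append_singleton_eq_map, List.nil_append,
      PySem.List.pyRange_zero_natCast, List.map_map]
  refine List.map_congr_left (fun k _ => ?_)
  simp only [Function.comp]
  rw [PySem.List.foldl_append_singleton_eq_map, List.nil_append]
  have hcomp : (fun j => PySem.List.pyGetD (PySem.List.pyGetD z j []) ((k : Int)) 0)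
      = (fun r => PySem.List.pyGetD r ((k : Int)) 0) ∘ (fun j => PySem.List.pyGetD z j ([] : List Int)) := rfl
  rw [hcomp, ← List.map_map, ← PySem.List.pyRange_zero_natCast z.length,
      PySem.List.map_pyGetD_pyRange_zero']

lemma getD_succ_tail (r : List Int) (i : Nat) : r.getD (i + 1) 0 = r.tail.getD i 0 := by
  cases r <;> simp

lemma pvDraw_eq (n : Nat) : ∀ its : List (List Int),
    pvDraw n its = (List.range n).map (fun i => its.map (fun r => r.getD i 0)) := by
  induction n with
  | zero => intro its; rfl
  | succ k ih =>
    intro its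
    rw [List.range_succ_eq_map, List.map_cons, List.map_map]
    show (its.map (fun it => it.headD 0) :: pvDraw k (its.map List.tail)) = _
    rw [ih (its.map List.tail)]
    congr 1
    · refine List.map_congr_left (fun r _ => ?_); cases r <;> simp
    · refine List.map_congr_left (fun i _ => ?_)
      simp only [Function.comp, List.map_map]
      exact List.map_congr_left (fun r _ => (getD_succ_tail r i).symm)

lemma portB_eq (z : List (List Int)) : Transpose_sq_alt z = pvT z := by
  unfold Transpose_sq_alt pvT
  rw [pvDraw_eq]
  refine List.map_congr_left (fun i _ => List.map_congr_left (fun r _ => ?_))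
  rw [PySem.List.pyGetD_natCast]

-- ===== VERDICT (by name: the statement is the Claim_ definition above) =====
theorem Transpose_sq_spec : Claim_equal_Transpose_sq := by
  intro z _ _
  unfold Spec_Transpose_sq
  rw [portA_eq, portB_eq]
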